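-- pv_equiv track=rewrite | github.com/n8nfelipe/app-security | app/backend/app/services/_firewall.py | _iptables_state
-- ===== SOURCE A (Python) =====
-- def _iptables_state(output: str) -> dict | None:
--     lines = [line.strip() for line in output.splitlines() if line.strip()]
--     if not lines:
--         return None
--     non_empty_rules = [line for line in lines if line.startswith("-A ")]
--     restrictive_policies = [line for line in lines if line.startswith("-P ") and (" DROP" in line or " REJECT" in line)]
--     custom_chains = [line for line in lines if line.startswith("-N ")]
--     if not (non_empty_rules or restrictive_policies or custom_chains):
--         return None
--     restrictive = bool(restrictive_policies) or any(" -j DROP" in line or " -j REJECT" in line for line in non_empty_rules)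
--     return {
--         "status": "restrictive" if restrictive else "permissive",
--         "evidence": "iptables possui regras/chains ativas" + (" com bloqueio explicito" if restrictive else " sem bloqueio explicito"),
--     }
-- ===== SOURCE B (Python) =====
-- def _iptables_state(output: str) -> dict | None:
--     has_rule = has_chain = has_policy = has_block = False
--     for raw in output.splitlines():
--         line = raw.strip()
--         if not line:
--             continue
--         if line.startswith("-A "):
--             has_rule = True
--             if " -j DROP" in line or " -j REJECT" in line:
--                 has_block = True
--         elif line.startswith("-N "):
--             has_chain = True
--         elif line.startswith("-P ") and (" DROP" in line or " REJECT" in line):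
--             has_policy = True
--     if not (has_rule or has_policy or has_chain):
--         return None
--     restrictive = has_policy or has_block
--     return {
--         "status": "restrictive" if restrictive else "permissive",
--         "evidence": "iptables possui regras/chains ativas" + (" com bloqueio explicito" if restrictive else " sem bloqueio explicito"),
--     }
-- ===== Notes on version B (the rewrite author's own statement) =====
-- stated objective: simpler
-- what changed: Replaces the intermediate lines list, three filtering list-comprehensions and the any() scan with a single pass over the raw lines that maintains four scalar booleans (the separate empty-lines guard also disappears, since all flags false already yields None).
import Mathlib
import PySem

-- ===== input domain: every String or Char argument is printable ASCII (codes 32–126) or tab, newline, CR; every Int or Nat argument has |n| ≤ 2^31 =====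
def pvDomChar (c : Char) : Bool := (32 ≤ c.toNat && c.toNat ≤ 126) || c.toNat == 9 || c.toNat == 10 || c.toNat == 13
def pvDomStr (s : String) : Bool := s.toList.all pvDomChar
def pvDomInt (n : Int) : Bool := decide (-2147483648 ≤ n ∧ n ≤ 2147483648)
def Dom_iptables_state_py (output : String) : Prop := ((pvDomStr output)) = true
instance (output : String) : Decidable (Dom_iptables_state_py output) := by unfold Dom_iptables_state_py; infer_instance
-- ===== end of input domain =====

-- B replaces A's intermediate list + three comprehensions + any() with one pass keeping four booleans (simpler; same O(n) cost).

-- ===== PORT A =====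
def iptables_state_py (output : String) : Option (List (String × String)) :=
  let lines := ((PySem.Str.splitlines output).map PySem.Str.strip).filter (fun l => l ≠ "")
  if lines = [] then none
  else
    let non_empty_rules := lines.filter (fun l => PySem.Str.startswith l "-A ")
    let restrictive_policies := lines.filter (fun l =>
      PySem.Str.startswith l "-P " && (PySem.Str.isIn " DROP" l || PySem.Str.isIn " REJECT" l))
    let custom_chains := lines.filter (fun l => PySem.Str.startswith l "-N ")
    if non_empty_rules = [] ∧ restrictive_policies = [] ∧ custom_chains = [] then none
    else
      let restrictive := !restrictive_policies.isEmpty ||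
        non_empty_rules.any (fun l => PySem.Str.isIn " -j DROP" l || PySem.Str.isIn " -j REJECT" l)
      some [("status", if restrictive then "restrictive" else "permissive"),
            ("evidence", "iptables possui regras/chains ativas" ++
              (if restrictive then " com bloqueio explicito" else " sem bloqueio explicito"))]

-- ===== PORT B =====
-- loop body of B's single pass; state = (has_rule, has_chain, has_policy, has_block)
def ipFoldStep (s : Bool × Bool × Bool × Bool) (raw : String) : Bool × Bool × Bool × Bool :=
  let line := PySem.Str.strip raw
  if line = "" then s
  else if PySem.Str.startswith line "-A " then
    (true, s.2.1, s.2.2.1,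
      s.2.2.2 || (PySem.Str.isIn " -j DROP" line || PySem.Str.isIn " -j REJECT" line))
  else if PySem.Str.startswith line "-N " then
    (s.1, true, s.2.2.1, s.2.2.2)
  else if PySem.Str.startswith line "-P " && (PySem.Str.isIn " DROP" line || PySem.Str.isIn " REJECT" line) then
    (s.1, s.2.1, true, s.2.2.2)
  else s

def iptables_state_py_alt (output : String) : Option (List (String × String)) :=
  let st := (PySem.Str.splitlines output).foldl ipFoldStep (false, false, false, false)
  if !(st.1 || st.2.2.1 || st.2.1) then none
  else
    let restrictive := st.2.2.1 || st.2.2.2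
    some [("status", if restrictive then "restrictive" else "permissive"),
          ("evidence", "iptables possui regras/chains ativas" ++
            (if restrictive then " com bloqueio explicito" else " sem bloqueio explicito"))]

-- ===== PRECONDITION & SPEC =====
def Spec_iptables_state_py (output : String) (out : Option (List (String × String))) : Prop := out = iptables_state_py_alt output
instance (output : String) (out : Option (List (String × String))) : Decidable (Spec_iptables_state_py output out) := by unfold Spec_iptables_state_py; infer_instance

-- ===== CLAIM (what is proved, stated in full; the proofs are below) =====
def Claim_equal_iptables_state_py : Prop := ∀ (output : String), Dom_iptables_state_py output → Spec_iptables_state_py output (iptables_state_py output)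

-- ===== LEMMAS AND PROOFS =====

-- line predicates (on the raw splitlines elements, after strip)
def ipQA (r : String) : Bool := PySem.Str.startswith (PySem.Str.strip r) "-A "
def ipQN (r : String) : Bool := PySem.Str.startswith (PySem.Str.strip r) "-N "
def ipQP (r : String) : Bool :=
  PySem.Str.startswith (PySem.Str.strip r) "-P " &&
    (PySem.Str.isIn " DROP" (PySem.Str.strip r) || PySem.Str.isIn " REJECT" (PySem.Str.strip r))
def ipQB (r : String) : Bool :=
  ipQA r && (PySem.Str.isIn " -j DROP" (PySem.Str.strip r) || PySem.Str.isIn " -j REJECT" (PySem.Str.strip r))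

theorem sw_excl {l : List Char} {c d : Char} (hc : ['-', c, ' '] <+: l) (hd : ['-', d, ' '] <+: l) : c = d := by
  obtain ⟨t, ht⟩ := hc
  obtain ⟨u, hu⟩ := hd
  rw [← ht] at hu
  have h2 : d = c ∧ u = t := by simpa using hu
  exact h2.1.symm

theorem sw_pair_false {l : List Char} {c d : Char} (hcd : c ≠ d)
    (h : PySem.Chars.startswith l ['-', c, ' '] = true) :
    PySem.Chars.startswith l ['-', d, ' '] = false := by
  rw [Bool.eq_false_iff]
  intro h'
  rw [PySem.Chars.startswith_iff] at h h'
  exact hcd (sw_excl h h')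

theorem ipQN_simp (r : String) : (!ipQA r && ipQN r) = ipQN r := by
  cases h : ipQN r
  · simp
  · have h' : PySem.Chars.startswith (PySem.Chars.strip r.toList) ['-', 'N', ' '] = true := by
      simpa [ipQN] using h
    have hA : ipQA r = false := by
      simpa [ipQA] using sw_pair_false (l := PySem.Chars.strip r.toList) (c := 'N') (d := 'A') (by decide) h'
    simp [hA]

theorem ipQP_simp (r : String) : (!ipQA r && (!ipQN r && ipQP r)) = ipQP r := by
  cases h : ipQP r
  · simp
  · have h' : PySem.Chars.startswith (PySem.Chars.strip r.toList) ['-', 'P', ' '] = true := by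
      have h2 := h
      simp [ipQP] at h2
      simpa using h2.1
    have hA : ipQA r = false := by
      simpa [ipQA] using sw_pair_false (l := PySem.Chars.strip r.toList) (c := 'P') (d := 'A') (by decide) h'
    have hN : ipQN r = false := by
      simpa [ipQN] using sw_pair_false (l := PySem.Chars.strip r.toList) (c := 'P') (d := 'N') (by decide) h'
    simp [hA, hN]

-- one step of B's loop, expressed through the line predicates
theorem step_char (s : Bool × Bool × Bool × Bool) (r : String) :
    ipFoldStep s r =
      (s.1 || ipQA r, s.2.1 || (!ipQA r && ipQN r),
       s.2.2.1 || (!ipQA r && (!ipQN r && ipQP r)), s.2.2.2 || ipQB r) := by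
  obtain ⟨a, b, c, d⟩ := s
  unfold ipFoldStep ipQB ipQA ipQN ipQP
  dsimp only
  have zA : PySem.Str.startswith "" "-A " = false := by decide
  have zN : PySem.Str.startswith "" "-N " = false := by decide
  have zP : PySem.Str.startswith "" "-P " = false := by decide
  have zJ1 : PySem.Str.isIn " -j DROP" "" = false := by decide
  have zJ2 : PySem.Str.isIn " -j REJECT" "" = false := by decide
  split_ifs with h1 h2 h3 h4
  · rw [h1]
    simp only [zA, zN, zP, zJ1, zJ2, Bool.not_false, Bool.true_and, Bool.false_and,
      Bool.and_false, Bool.or_false, Bool.false_or]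
  · simp only [h2, Bool.not_true, Bool.true_and, Bool.false_and, Bool.or_false, Bool.or_true]
  · rw [Bool.not_eq_true] at h2
    simp only [h2, h3, Bool.not_true, Bool.not_false, Bool.true_and, Bool.false_and,
      Bool.and_false, Bool.or_false, Bool.or_true, Bool.false_or]
  · rw [Bool.not_eq_true] at h2 h3
    simp only [h2, h3, h4, Bool.not_true, Bool.not_false, Bool.true_and, Bool.false_and,
      Bool.and_false, Bool.or_false, Bool.or_true, Bool.false_or]
  · rw [Bool.not_eq_true] at h2 h3 h4
    simp only [h2, h3, h4, Bool.not_true, Bool.not_false, Bool.true_and, Bool.false_and,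
      Bool.and_false, Bool.or_false, Bool.or_true, Bool.false_or]

-- the single-pass fold computes a disjunction over the lines
theorem fold_char (L : List String) (s : Bool × Bool × Bool × Bool) :
    L.foldl ipFoldStep s =
      (s.1 || L.any ipQA,
       s.2.1 || L.any (fun r => !ipQA r && ipQN r),
       s.2.2.1 || L.any (fun r => !ipQA r && (!ipQN r && ipQP r)),
       s.2.2.2 || L.any ipQB) := by
  induction L generalizing s with
  | nil => simp
  | cons r L ih =>
    simp only [List.foldl_cons, List.any_cons]
    rw [ih, step_char]
    simp [Bool.or_assoc]

-- lifting an any over A's stripped non-empty lines to an any over the raw lines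
theorem any_strip_lines (L : List String) (p : String → Bool) (hp : p "" = false) :
    (((L.map PySem.Str.strip).filter (fun l => l ≠ "")).any p) =
      L.any (fun r => p (PySem.Str.strip r)) := by
  induction L with
  | nil => simp
  | cons r L ih =>
    by_cases h : PySem.Str.strip r = ""
    · simp [h, hp] at ih ⊢
      exact ih
    · simp [h] at ih ⊢
      rw [ih]

theorem filter_nil_iff_any_false {α : Type} (l : List α) (p : α → Bool) :
    l.filter p = [] ↔ l.any p = false := by
  simp [List.filter_eq_nil_iff, List.any_eq_false]

theorem not_isEmpty_filter {α : Type} (l : List α) (p : α → Bool) :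
    (!(l.filter p).isEmpty) = l.any p := by
  induction l with
  | nil => simp
  | cons a l ih =>
    by_cases h : p a = true <;> simp [List.filter_cons, h, ih]

-- ===== VERDICT (by name: the statement is the Claim_ definition above) =====
theorem iptables_state_py_spec : Claim_equal_iptables_state_py := by
  intro output _
  unfold Spec_iptables_state_py iptables_state_py iptables_state_py_alt
  rw [fold_char]
  have eN : (fun r => !ipQA r && ipQN r) = ipQN := funext ipQN_simp
  have eP : (fun r => !ipQA r && (!ipQN r && ipQP r)) = ipQP := funext ipQP_simp
  rw [eN, eP]
  simp only [Bool.false_or]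
  set L := PySem.Str.splitlines output with hLdef
  set lines := (L.map PySem.Str.strip).filter (fun l => l ≠ "") with hlines
  have bA : lines.any (fun l => PySem.Str.startswith l "-A ") = L.any ipQA :=
    any_strip_lines L _ (by decide)
  have bN : lines.any (fun l => PySem.Str.startswith l "-N ") = L.any ipQN :=
    any_strip_lines L _ (by decide)
  have bP : lines.any (fun l =>
      PySem.Str.startswith l "-P " && (PySem.Str.isIn " DROP" l || PySem.Str.isIn " REJECT" l)) = L.any ipQP :=
    any_strip_lines L _ (by decide)
  have cA : (lines.filter (fun l => PySem.Str.startswith l "-A ") = []) ↔ L.any ipQA = false := by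
    rw [filter_nil_iff_any_false, bA]
  have cN : (lines.filter (fun l => PySem.Str.startswith l "-N ") = []) ↔ L.any ipQN = false := by
    rw [filter_nil_iff_any_false, bN]
  have cP : (lines.filter (fun l =>
      PySem.Str.startswith l "-P " && (PySem.Str.isIn " DROP" l || PySem.Str.isIn " REJECT" l)) = []) ↔
      L.any ipQP = false := by
    rw [filter_nil_iff_any_false, bP]
  have eEmpty : (!(lines.filter (fun l =>
      PySem.Str.startswith l "-P " && (PySem.Str.isIn " DROP" l || PySem.Str.isIn " REJECT" l))).isEmpty) =
      L.any ipQP := by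
    rw [not_isEmpty_filter, bP]
  have eJ : ((lines.filter (fun l => PySem.Str.startswith l "-A ")).any
      (fun l => PySem.Str.isIn " -j DROP" l || PySem.Str.isIn " -j REJECT" l)) = L.any ipQB := by
    rw [List.any_filter]
    exact any_strip_lines L _ (by decide)
  by_cases h0 : lines = []
  · have hall : ∀ r ∈ L, PySem.Str.strip r = "" := by
      intro r hr
      have hm : PySem.Str.strip r ∈ L.map PySem.Str.strip := List.mem_map_of_mem hr
      have := List.filter_eq_nil_iff.mp h0 (PySem.Str.strip r) hm
      simpa using this
    have hqA : L.any ipQA = false := by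
      simp only [List.any_eq_false]
      intro r hr
      unfold ipQA
      rw [hall r hr]
      decide
    have hqN : L.any ipQN = false := by
      simp only [List.any_eq_false]
      intro r hr
      unfold ipQN
      rw [hall r hr]
      decide
    have hqP : L.any ipQP = false := by
      simp only [List.any_eq_false]
      intro r hr
      unfold ipQP
      rw [hall r hr]
      decide
    simp [h0, hqA, hqN, hqP]
  · rw [if_neg h0, eEmpty, eJ]
    have hc : (List.filter (fun l => PySem.Str.startswith l "-A ") lines = [] ∧
        List.filter (fun l =>
          PySem.Str.startswith l "-P " && (PySem.Str.isIn " DROP" l || PySem.Str.isIn " REJECT" l)) lines = [] ∧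
        List.filter (fun l => PySem.Str.startswith l "-N ") lines = []) ↔
        ((!(L.any ipQA || L.any ipQP || L.any ipQN)) = true) := by
      rw [cA, cP, cN]
      cases hbA : L.any ipQA <;> cases hbP : L.any ipQP <;> cases hbN : L.any ipQN <;> simp
    simp only [hc]
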